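-- pv_equiv track=rewrite | github.com/Xiaoyu-Tao/AnomaMind-TS | scripts/generate_train_answer.py | convert_intervals_to_dict
-- ===== SOURCE A (Python) =====
-- from typing import Dict, Any, List, Optional
--
-- def convert_intervals_to_dict(intervals: List[List[int]], data_indices: List) -> Dict[str, int]:
--     """将异常区间转换为 {index_str: 0/1} 字典"""
--     gt_dict = {str(idx): 0 for idx in data_indices}
--     for interval in intervals:
--         if not isinstance(interval, (list, tuple)) or len(interval) == 0:
--             continue
--         start = end = interval[0]
--         if len(interval) >= 2:
--             start, end = interval[0], interval[1]
--         if start > end: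
--             start, end = end, start
--
--         for idx in data_indices:
--             if start <= idx <= end:
--                 gt_dict[str(idx)] = 1
--     return gt_dict
-- ===== SOURCE B (Python) =====
-- from typing import Dict, List
--
--
-- def convert_intervals_to_dict(intervals: List[List[int]], data_indices: List) -> Dict[str, int]:
--     """Normalize intervals, sort and merge them, then decide each index by binary search."""
--     spans = []
--     for iv in intervals:
--         if isinstance(iv, (list, tuple)) and len(iv) > 0:
--             s = iv[0]
--             e = iv[1] if len(iv) >= 2 else iv[0]
--             if s > e:
--                 s, e = e, s
--             spans.append((s, e))
--     spans.sort(key=lambda t: t[0])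
--     merged = []
--     for s, e in spans:
--         if merged and s <= merged[-1][1]:
--             if e > merged[-1][1]:
--                 merged[-1] = (merged[-1][0], e)
--         else:
--             merged.append((s, e))
--
--     def covered(idx):
--         lo, hi = 0, len(merged) - 1
--         while lo < hi:
--             mid = (lo + hi + 1) // 2
--             if merged[mid][0] <= idx:
--                 lo = mid
--             else:
--                 hi = mid - 1
--         return bool(merged) and merged[lo][0] <= idx <= merged[lo][1]
--
--     return {str(idx): (1 if covered(idx) else 0) for idx in data_indices}
-- ===== Notes on version B (the rewrite author's own statement) =====
-- stated objective: faster
-- what changed: Instead of re-scanning all data indices for every interval and marking a dict in place, B normalizes the intervals once, sorts and merges them into disjoint spans, and decides each index with one binary search over the merged spans.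
import Mathlib
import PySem

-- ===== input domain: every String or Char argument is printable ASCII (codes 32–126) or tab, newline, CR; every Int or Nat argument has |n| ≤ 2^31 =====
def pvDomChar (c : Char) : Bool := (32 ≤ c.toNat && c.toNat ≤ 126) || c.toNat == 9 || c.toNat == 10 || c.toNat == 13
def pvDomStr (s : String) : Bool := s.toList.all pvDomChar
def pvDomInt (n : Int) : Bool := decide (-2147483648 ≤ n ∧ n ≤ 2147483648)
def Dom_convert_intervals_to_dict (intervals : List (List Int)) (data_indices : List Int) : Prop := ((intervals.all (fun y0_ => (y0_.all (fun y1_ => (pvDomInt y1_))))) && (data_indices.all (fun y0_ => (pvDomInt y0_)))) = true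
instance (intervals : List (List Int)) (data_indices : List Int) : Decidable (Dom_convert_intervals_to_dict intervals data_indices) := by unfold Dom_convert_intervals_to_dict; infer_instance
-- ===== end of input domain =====

-- B replaces A's per-interval rescan of all data indices by sort+merge of the
-- intervals once and a binary search per index; equivalence of the returned dict
-- (as an insertion-ordered association list) is proved for all inputs.

-- ===== PORT A =====
def convert_intervals_to_dict (intervals : List (List Int)) (data_indices : List Int) : List (String × Int) :=
  let gt0 : PySem.Dict String Int :=
    data_indices.foldl (fun d idx => d.insert (PySem.Int.toStr idx) 0) PySem.Dict.empty
  let gt := intervals.foldl (fun d interval =>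
    match interval with
    | [] => d
    | a :: rest =>
      let e := match rest with | b :: _ => b | [] => a
      let se := if a > e then (e, a) else (a, e)
      data_indices.foldl (fun d idx =>
        if se.1 ≤ idx && idx ≤ se.2 then d.insert (PySem.Int.toStr idx) 1 else d) d) gt0
  gt.items

-- ===== PORT B =====
-- spans: normalized (lo, hi) pairs of the non-empty intervals, in order
def spansOf (intervals : List (List Int)) : List (Int × Int) :=
  intervals.foldl (fun acc iv =>
    match iv with
    | [] => acc
    | a :: rest =>
      let e := match rest with | b :: _ => b | [] => a
      if a > e then acc ++ [(e, a)] else acc ++ [(a, e)]) []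

-- one step of Source B's merge loop; the accumulator keeps merged in REVERSE
-- (head = merged[-1]), the obvious functional state for "update the last element"
def mstep (r : List (Int × Int)) (p : Int × Int) : List (Int × Int) :=
  match r with
  | [] => [p]
  | (s0, e0) :: t =>
    if p.1 ≤ e0 then (if e0 < p.2 then (s0, p.2) :: t else (s0, e0) :: t)
    else p :: (s0, e0) :: t

def mergeRev (spans : List (Int × Int)) : List (Int × Int) := spans.foldl mstep []

-- Source B's while-loop: rightmost lo with merged[lo][0] <= idx
def covLoop (merged : List (Int × Int)) (idx : Int) (lo hi : Nat) : Nat :=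
  if lo < hi then
    if (merged.getD ((lo + hi + 1) / 2) (0, 0)).1 ≤ idx then
      covLoop merged idx ((lo + hi + 1) / 2) hi
    else
      covLoop merged idx lo ((lo + hi + 1) / 2 - 1)
  else lo
termination_by hi - lo
decreasing_by all_goals omega

def coveredB (merged : List (Int × Int)) (idx : Int) : Bool :=
  match merged with
  | [] => false
  | _ :: _ =>
    let lo := covLoop merged idx 0 (merged.length - 1)
    (merged.getD lo (0, 0)).1 ≤ idx && idx ≤ (merged.getD lo (0, 0)).2

def convert_intervals_to_dict_alt (intervals : List (List Int)) (data_indices : List Int) : List (String × Int) :=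
  let merged := (mergeRev (PySem.List.sorted (spansOf intervals) (fun t => t.1) false)).reverse
  (data_indices.foldl (fun d idx =>
     d.insert (PySem.Int.toStr idx) (if coveredB merged idx then 1 else 0)) PySem.Dict.empty).items

-- ===== PRECONDITION & SPEC =====
def Spec_convert_intervals_to_dict (intervals : List (List Int)) (data_indices : List Int) (out : List (String × Int)) : Prop := out = convert_intervals_to_dict_alt intervals data_indices
instance (intervals : List (List Int)) (data_indices : List Int) (out : List (String × Int)) : Decidable (Spec_convert_intervals_to_dict intervals data_indices out) := by unfold Spec_convert_intervals_to_dict; infer_instance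

-- ===== CLAIM (what is proved, stated in full; the proofs are below) =====
def Claim_equal_convert_intervals_to_dict : Prop := ∀ (intervals : List (List Int)) (data_indices : List Int), Dom_convert_intervals_to_dict intervals data_indices → Spec_convert_intervals_to_dict intervals data_indices (convert_intervals_to_dict intervals data_indices)

-- ===== LEMMAS AND PROOFS =====

-- ---- str(n) is injective ----
def rec10 (n : Nat) : List Char :=
  if n < 10 then [Nat.digitChar n] else rec10 (n / 10) ++ [Nat.digitChar (n % 10)]
termination_by n
decreasing_by omega

lemma digitChar_inj_lt : ∀ a < 10, ∀ b < 10, Nat.digitChar a = Nat.digitChar b → a = b := by decide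

lemma digitChar_ne_dash : ∀ a < 10, Nat.digitChar a ≠ '-' := by decide

lemma rec10_ne_nil (n : Nat) : rec10 n ≠ [] := by
  rw [rec10]; split
  · exact List.cons_ne_nil _ _
  · intro h
    have := congrArg List.length h
    simp at this

lemma rec10_mem (n : Nat) : ∀ c ∈ rec10 n, ∃ d, d < 10 ∧ c = Nat.digitChar d := by
  induction n using rec10.induct with
  | case1 n h => rw [rec10]; simp only [if_pos h]; intro c hc
                 simp at hc; exact ⟨n, h, hc⟩
  | case2 n h ih =>
    rw [rec10]; simp only [if_neg h]; intro c hc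
    rcases List.mem_append.mp hc with h1 | h1
    · exact ih c h1
    · simp at h1; exact ⟨n % 10, by omega, h1⟩

lemma rec10_len2 {n : Nat} (h : ¬ n < 10) : 2 ≤ (rec10 n).length := by
  rw [rec10]; simp only [if_neg h, List.length_append, List.length_cons, List.length_nil]
  have := rec10_ne_nil (n / 10)
  have : 0 < (rec10 (n / 10)).length := List.length_pos_of_ne_nil this
  omega

lemma rec10_inj : ∀ m n : Nat, rec10 m = rec10 n → m = n := by
  intro m
  induction m using Nat.strong_induction_on with
  | _ m ih =>
    intro n heq
    by_cases hm : m < 10 <;> by_cases hn : n < 10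
    · rw [rec10] at heq
      simp only [if_pos hm] at heq
      rw [rec10] at heq
      simp only [if_pos hn] at heq
      simp at heq; exact digitChar_inj_lt m hm n hn heq
    · exfalso
      have h2 := rec10_len2 hn
      rw [rec10] at heq; simp only [if_pos hm] at heq
      rw [← heq] at h2; simp at h2
    · exfalso
      have h2 := rec10_len2 hm
      nth_rewrite 2 [rec10] at heq
      simp only [if_pos hn] at heq
      rw [heq] at h2; simp at h2
    · nth_rewrite 2 [rec10] at heq
      rw [rec10] at heq
      simp only [if_neg hm, if_neg hn] at heq
      have hlast : Nat.digitChar (m % 10) = Nat.digitChar (n % 10) ∧ rec10 (m / 10) = rec10 (n / 10) := by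
        have := List.append_inj' heq (by simp)
        exact ⟨by simpa using this.2, this.1⟩
      have h1 : m % 10 = n % 10 := digitChar_inj_lt _ (by omega) _ (by omega) hlast.1
      have h2 : m / 10 = n / 10 := ih (m / 10) (by omega) (n / 10) hlast.2
      omega

lemma toDigitsCore_eq : ∀ fuel n ds, n ≤ fuel →
    Nat.toDigitsCore 10 (fuel + 1) n ds = rec10 n ++ ds := by
  intro fuel
  induction fuel with
  | zero =>
    intro n ds h
    have hn : n = 0 := by omega
    subst hn
    show Nat.toDigitsCore 10 1 0 ds = rec10 0 ++ ds
    rw [rec10]; simp [Nat.toDigitsCore]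
  | succ f ih =>
    intro n ds h
    show Nat.toDigitsCore 10 (f + 1 + 1) n ds = rec10 n ++ ds
    rw [Nat.toDigitsCore]
    by_cases h10 : n / 10 = 0
    · have hlt : n < 10 := by omega
      simp only [if_pos h10]
      rw [rec10]; simp [if_pos hlt, Nat.mod_eq_of_lt hlt]
    · simp only [if_neg h10]
      rw [ih (n / 10) _ (by omega)]
      nth_rewrite 2 [rec10]
      have : ¬ n < 10 := by omega
      simp [if_neg this]

lemma toDigits_eq (n : Nat) : Nat.toDigits 10 n = rec10 n := by
  show Nat.toDigitsCore 10 (n + 1) n [] = rec10 n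
  rw [toDigitsCore_eq n n [] (le_refl n)]; simp

lemma dash_not_mem_rec10 (n : Nat) : '-' ∉ rec10 n := by
  intro h
  obtain ⟨d, hd, he⟩ := rec10_mem n '-' h
  exact digitChar_ne_dash d hd he.symm

lemma toStr_inj : Function.Injective PySem.Int.toStr := by
  intro m n h
  have h2 : PySem.Int.toChars m = PySem.Int.toChars n := by
    rw [← PySem.Int.toList_toStr, ← PySem.Int.toList_toStr, h]
  unfold PySem.Int.toChars at h2
  simp only [toDigits_eq] at h2
  by_cases hm : m < 0 <;> by_cases hn : n < 0
  · simp only [if_pos hm, if_pos hn] at h2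
    simp at h2
    have := rec10_inj _ _ h2
    omega
  · exfalso
    simp only [if_pos hm, if_neg hn] at h2
    have : '-' ∈ rec10 n.toNat := by rw [← h2]; simp
    exact dash_not_mem_rec10 _ this
  · exfalso
    simp only [if_neg hm, if_pos hn] at h2
    have : '-' ∈ rec10 m.toNat := by rw [h2]; simp
    exact dash_not_mem_rec10 _ this
  · simp only [if_neg hm, if_neg hn] at h2
    have := rec10_inj _ _ h2
    omega

-- ---- coverage ----
def covB (l : List (Int × Int)) (i : Int) : Bool := l.any (fun p => p.1 ≤ i && i ≤ p.2)

def normIv : List Int → Option (Int × Int)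
  | [] => none
  | a :: rest =>
    let e := match rest with | b :: _ => b | [] => a
    some (if a > e then (e, a) else (a, e))

lemma spansOf_eq (intervals : List (List Int)) :
    spansOf intervals = intervals.filterMap normIv := by
  suffices h : ∀ (l : List (List Int)) (acc : List (Int × Int)),
      l.foldl (fun acc iv => match iv with
        | [] => acc
        | a :: rest =>
          let e := match rest with | b :: _ => b | [] => a
          if a > e then acc ++ [(e, a)] else acc ++ [(a, e)]) acc = acc ++ l.filterMap normIv by
    simpa [spansOf] using h intervals []
  intro l
  induction l with
  | nil => intro acc; simp
  | cons iv rest ih =>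
    intro acc
    rw [List.foldl_cons, List.filterMap_cons]
    cases iv with
    | nil => simpa [normIv] using ih acc
    | cons a t =>
      have hn : normIv (a :: t) = some (if a > (match t with | b :: _ => b | [] => a)
          then ((match t with | b :: _ => b | [] => a), a)
          else (a, (match t with | b :: _ => b | [] => a))) := rfl
      rw [hn]
      dsimp only
      split_ifs with h <;> rw [ih] <;> simp

lemma wf_norm : ∀ (iv : List Int) (p : Int × Int), normIv iv = some p → p.1 ≤ p.2 := by
  intro iv p h
  cases iv with
  | nil => simp [normIv] at h
  | cons a t =>
    simp only [normIv, Option.some_inj] at h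
    split_ifs at h <;> (rw [← h]; simp; omega)

lemma wf_spans (intervals : List (List Int)) :
    ∀ p ∈ spansOf intervals, p.1 ≤ p.2 := by
  rw [spansOf_eq]
  intro p hp
  obtain ⟨iv, _, hn⟩ := List.mem_filterMap.mp hp
  exact wf_norm iv p hn

-- ---- merge ----
def OkR (r : List (Int × Int)) : Prop :=
  r.Pairwise (fun p q => q.2 < p.1) ∧ ∀ p ∈ r, p.1 ≤ p.2

lemma merge_fold (i : Int) : ∀ (l r : List (Int × Int)),
    l.Pairwise (fun p q => p.1 ≤ q.1) → (∀ p ∈ l, p.1 ≤ p.2) → OkR r →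
    (∀ p ∈ r, ∀ q ∈ l, p.1 ≤ q.1) →
    OkR (l.foldl mstep r) ∧ (covB (l.foldl mstep r) i = (covB r i || covB l i)) := by
  intro l
  induction l with
  | nil =>
    intro r _ _ hr _
    simpa [covB] using hr
  | cons p l ih =>
    intro r hsort hwf hr hmax
    rw [List.foldl_cons]
    have hp12 : p.1 ≤ p.2 := hwf p (by simp)
    obtain ⟨hple, hsortl⟩ := List.pairwise_cons.mp hsort
    have key : OkR (mstep r p) ∧ (∀ p' ∈ mstep r p, ∀ q ∈ l, p'.1 ≤ q.1) ∧
        (covB (mstep r p) i = (covB r i || (decide (p.1 ≤ i) && decide (i ≤ p.2)))) := by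
      cases r with
      | nil =>
        refine ⟨⟨by simp [mstep], by simpa [mstep] using hp12⟩, ?_, ?_⟩
        · intro p' hp' q hq
          simp [mstep] at hp'
          rw [hp']; exact hple q hq
        · simp [mstep, covB]
      | cons h0 t =>
        obtain ⟨s0, e0⟩ := h0
        have hs0p : s0 ≤ p.1 := hmax (s0, e0) (by simp) p (by simp)
        obtain ⟨hpw_r, hwf_r⟩ := hr
        obtain ⟨hhead, hpw_t⟩ := List.pairwise_cons.mp hpw_r
        have hs0e0 : s0 ≤ e0 := hwf_r (s0, e0) (by simp)
        by_cases h1 : p.1 ≤ e0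
        · by_cases h2 : e0 < p.2
          · simp only [mstep, if_pos h1, if_pos h2]
            refine ⟨⟨List.pairwise_cons.mpr ⟨by simpa using hhead, hpw_t⟩, ?_⟩, ?_, ?_⟩
            · intro q hq
              rcases List.mem_cons.mp hq with h | h
              · rw [h]; simp; omega
              · exact hwf_r q (List.mem_cons_of_mem _ h)
            · intro p' hp' q hq
              rcases List.mem_cons.mp hp' with h | h
              · rw [h]; exact le_trans hs0p (hple q hq)
              · exact hmax p' (List.mem_cons_of_mem _ h) q (List.mem_cons_of_mem _ hq)
            · rw [Bool.eq_iff_iff]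
              simp only [covB, List.any_cons, Bool.or_eq_true, Bool.and_eq_true, decide_eq_true_eq]
              constructor
              · rintro (h | h)
                · by_cases hi : i ≤ e0
                  · exact Or.inl (Or.inl ⟨h.1, hi⟩)
                  · exact Or.inr ⟨by omega, h.2⟩
                · exact Or.inl (Or.inr h)
              · rintro ((h | h) | h)
                · exact Or.inl ⟨h.1, by omega⟩
                · exact Or.inr h
                · exact Or.inl ⟨by omega, h.2⟩
          · simp only [mstep, if_pos h1, if_neg h2]
            refine ⟨⟨hpw_r, hwf_r⟩, ?_, ?_⟩
            · intro p' hp' q hq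
              exact hmax p' hp' q (List.mem_cons_of_mem _ hq)
            · rw [Bool.eq_iff_iff]
              simp only [covB, List.any_cons, Bool.or_eq_true, Bool.and_eq_true, decide_eq_true_eq]
              constructor
              · rintro h; exact Or.inl h
              · rintro ((h | h) | h)
                · exact Or.inl h
                · exact Or.inr h
                · exact Or.inl ⟨by omega, by omega⟩
        · simp only [mstep, if_neg h1]
          refine ⟨⟨List.pairwise_cons.mpr ⟨?_, hpw_r⟩, ?_⟩, ?_, ?_⟩
          · intro q hq
            rcases List.mem_cons.mp hq with h | h
            · rw [h]; simp; omega
            · have := hhead q h; simp at this ⊢; omega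
          · intro q hq
            rcases List.mem_cons.mp hq with h | h
            · rw [h]; exact hp12
            · exact hwf_r q h
          · intro p' hp' q hq
            rcases List.mem_cons.mp hp' with h | h
            · rw [h]; exact hple q hq
            · exact hmax p' h q (List.mem_cons_of_mem _ hq)
          · rw [Bool.eq_iff_iff]
            simp only [covB, List.any_cons, Bool.or_eq_true, Bool.and_eq_true, decide_eq_true_eq]
            tauto
    obtain ⟨hok', hmax', hcov'⟩ := key
    have hwfl : ∀ q ∈ l, q.1 ≤ q.2 := fun q hq => hwf q (List.mem_cons_of_mem _ hq)
    obtain ⟨hok'', hcov''⟩ := ih (mstep r p) hsortl hwfl hok' hmax'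
    refine ⟨hok'', ?_⟩
    rw [hcov'', hcov']
    simp only [covB, List.any_cons]
    cases covB r i <;> cases (decide (p.1 ≤ i) && decide (i ≤ p.2)) <;> simp

-- ---- binary search ----
lemma covLoop_range (m : List (Int × Int)) (i : Int) : ∀ k lo hi, hi - lo = k → lo ≤ hi →
    lo ≤ covLoop m i lo hi ∧ covLoop m i lo hi ≤ hi := by
  intro k
  induction k using Nat.strong_induction_on with
  | _ k ih =>
    intro lo hi hk hle
    rw [covLoop]
    by_cases hlt : lo < hi
    · simp only [if_pos hlt]
      have hmid : lo < (lo + hi + 1) / 2 ∧ (lo + hi + 1) / 2 ≤ hi := by omega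
      split
      · have := ih (hi - (lo + hi + 1) / 2) (by omega) ((lo + hi + 1) / 2) hi rfl (by omega)
        omega
      · have := ih ((lo + hi + 1) / 2 - 1 - lo) (by omega) lo ((lo + hi + 1) / 2 - 1) rfl (by omega)
        omega
    · simp only [if_neg hlt]
      omega

lemma covLoop_eq (m : List (Int × Int)) (i : Int)
    (hpw : m.Pairwise (fun p q => p.2 < q.1)) (hwf : ∀ p ∈ m, p.1 ≤ p.2)
    (j : Nat) (hj : j < m.length) (hc1 : m[j].1 ≤ i) (hc2 : i ≤ m[j].2) :
    ∀ k lo hi, hi - lo = k → lo ≤ j → j ≤ hi → hi < m.length → covLoop m i lo hi = j := by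
  have gap := List.pairwise_iff_getElem.mp hpw
  intro k
  induction k using Nat.strong_induction_on with
  | _ k ih =>
    intro lo hi hk h1 h2 h3
    rw [covLoop]
    by_cases hlt : lo < hi
    · simp only [if_pos hlt]
      have hmid : lo < (lo + hi + 1) / 2 ∧ (lo + hi + 1) / 2 ≤ hi := by omega
      have hmlen : (lo + hi + 1) / 2 < m.length := by omega
      rw [List.getD_eq_getElem m (0, 0) hmlen]
      split
      · rename_i hc
        refine ih (hi - (lo + hi + 1) / 2) (by omega) _ hi rfl ?_ h2 h3
        by_contra hnot
        have hg := gap j ((lo + hi + 1) / 2) (by omega) hmlen (by omega)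
        omega
      · rename_i hc
        refine ih ((lo + hi + 1) / 2 - 1 - lo) (by omega) lo _ rfl h1 ?_ (by omega)
        rcases Nat.lt_or_ge j ((lo + hi + 1) / 2) with h | h
        · omega
        · exfalso
          rcases Nat.eq_or_lt_of_le h with h | h
          · simp only [← h] at hc1; omega
          · have hg := gap ((lo + hi + 1) / 2) j hmlen hj h
            have hw := hwf (m[(lo + hi + 1) / 2]) (List.getElem_mem hmlen)
            omega
    · simp only [if_neg hlt]
      omega

lemma coveredB_iff (m : List (Int × Int)) (i : Int)
    (hpw : m.Pairwise (fun p q => p.2 < q.1)) (hwf : ∀ p ∈ m, p.1 ≤ p.2) :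
    coveredB m i = covB m i := by
  cases hm : m with
  | nil => simp [coveredB, covB]
  | cons p0 t =>
    rw [← hm]
    have hne : m ≠ [] := by rw [hm]; simp
    have hlen : 0 < m.length := List.length_pos_of_ne_nil hne
    have hcb : coveredB m i =
        ((m.getD (covLoop m i 0 (m.length - 1)) (0, 0)).1 ≤ i &&
          i ≤ (m.getD (covLoop m i 0 (m.length - 1)) (0, 0)).2) := by
      rw [hm]; rfl
    rw [hcb]
    have hr := covLoop_range m i (m.length - 1 - 0) 0 (m.length - 1) rfl (by omega)
    have hlo : covLoop m i 0 (m.length - 1) < m.length := by omega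
    simp only [List.getD_eq_getElem m (0, 0) hlo]
    rw [Bool.eq_iff_iff]
    simp only [covB, List.any_eq_true, Bool.and_eq_true, decide_eq_true_eq]
    constructor
    · rintro ⟨hc1, hc2⟩
      exact ⟨_, List.getElem_mem hlo, hc1, hc2⟩
    · rintro ⟨p, hp, hc1, hc2⟩
      obtain ⟨j, hj, hpj⟩ := List.mem_iff_getElem.mp hp
      rw [← hpj] at hc1 hc2
      have := covLoop_eq m i hpw hwf j hj hc1 hc2 (m.length - 1 - 0) 0 (m.length - 1)
        rfl (by omega) (by omega) (by omega)
      simp only [this]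
      exact ⟨hc1, hc2⟩

-- ---- dict machinery ----
def Vals (d : PySem.Dict String Int) (v : String → Int) : Prop :=
  ∀ p ∈ d.items, p.2 = v p.1

lemma vals_congr {d : PySem.Dict String Int} {v v' : String → Int}
    (h : Vals d v) (hvv : ∀ k, v k = v' k) : Vals d v' := by
  intro p hp; rw [← hvv]; exact h p hp

lemma vals_insert {d : PySem.Dict String Int} {v : String → Int} {k : String} {w : Int}
    (h : Vals d v) (hv : v k = w) : Vals (d.insert k w) v := by
  intro p hp
  rcases (PySem.Dict.mem_items_insert d k w p).mp hp with h1 | h1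
  · rw [h1]; exact hv.symm
  · exact h p h1.1

lemma vals_insert_update {d : PySem.Dict String Int} {v : String → Int} {k : String} {w : Int}
    (h : Vals d v) : Vals (d.insert k w) (fun k' => if k' = k then w else v k') := by
  intro p hp
  rcases (PySem.Dict.mem_items_insert d k w p).mp hp with h1 | h1
  · rw [h1]; simp
  · simp only [if_neg h1.2]
    exact h p h1.1

-- ---- loop characterizations ----
lemma any_or (l : List Int) (f g : Int → Bool) :
    l.any (fun x => f x || g x) = (l.any f || l.any g) := by
  induction l with
  | nil => simp
  | cons x t ih => cases hf : f x <;> cases hg : g x <;> simp [List.any_cons, hf, hg, ih]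

lemma vals_mark (c : Int → Bool) : ∀ (data : List Int) (d : PySem.Dict String Int) (v : String → Int), Vals d v →
    Vals (data.foldl (fun d idx => if c idx then d.insert (PySem.Int.toStr idx) 1 else d) d)
      (fun k => if data.any (fun j => c j && (PySem.Int.toStr j == k)) then 1 else v k) := by
  intro data
  induction data with
  | nil =>
    intro d v h
    simp only [List.foldl_nil, List.any_nil]
    exact vals_congr h (fun k => by simp)
  | cons idx rest ih =>
    intro d v h
    rw [List.foldl_cons]
    by_cases hc : c idx = true
    · rw [if_pos hc]
      have h2 := ih _ _ (vals_insert_update (k := PySem.Int.toStr idx) (w := 1) h)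
      refine vals_congr h2 ?_
      intro k
      simp only [List.any_cons, hc, Bool.true_and]
      by_cases hrest : rest.any (fun j => c j && (PySem.Int.toStr j == k)) = true
      · simp [hrest]
      · simp only [Bool.not_eq_true] at hrest
        by_cases hk : PySem.Int.toStr idx = k
        · simp [hk, hrest]
        · have hbk : (PySem.Int.toStr idx == k) = false := by simpa using hk
          simp [hbk, hrest, Ne.symm hk]
    · have hcf : c idx = false := by simpa using hc
      rw [if_neg hc]
      refine vals_congr (ih _ _ h) ?_
      intro k
      simp [List.any_cons, hcf]

lemma keys_mark (c : Int → Bool) : ∀ (data : List Int) (d : PySem.Dict String Int),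
    (∀ i ∈ data, PySem.Int.toStr i ∈ d.keys) →
    (data.foldl (fun d idx => if c idx then d.insert (PySem.Int.toStr idx) 1 else d) d).keys = d.keys := by
  intro data
  induction data with
  | nil => intro d _; simp
  | cons idx rest ih =>
    intro d h
    rw [List.foldl_cons]
    by_cases hc : c idx = true
    · rw [if_pos hc]
      have hk : (d.insert (PySem.Int.toStr idx) 1).keys = d.keys :=
        PySem.Dict.keys_insert_of_contains d 1
          ((PySem.Dict.contains_iff_mem_keys d _).mpr (h idx (by simp)))
      rw [ih _ (fun i hi => by rw [hk]; exact h i (List.mem_cons_of_mem _ hi)), hk]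
    · rw [if_neg hc]
      exact ih _ (fun i hi => h i (List.mem_cons_of_mem _ hi))

-- A's outer loop body, rephrased through normIv (definitional)
lemma ostep_eq (data : List Int) (d : PySem.Dict String Int) (iv : List Int) :
    (match iv with
      | [] => d
      | a :: rest =>
        let e := match rest with | b :: _ => b | [] => a
        let se := if a > e then (e, a) else (a, e)
        data.foldl (fun d idx =>
          if se.1 ≤ idx && idx ≤ se.2 then d.insert (PySem.Int.toStr idx) 1 else d) d)
    = (match normIv iv with
      | none => d
      | some se => data.foldl (fun d idx =>
          if se.1 ≤ idx && idx ≤ se.2 then d.insert (PySem.Int.toStr idx) 1 else d) d) := by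
  cases iv with
  | nil => rfl
  | cons a t => rfl

lemma A_fold_vals (data : List Int) : ∀ (ivs : List (List Int)) (d : PySem.Dict String Int) (v : String → Int), Vals d v →
    Vals (ivs.foldl (fun d iv => match normIv iv with
      | none => d
      | some se => data.foldl (fun d idx =>
          if se.1 ≤ idx && idx ≤ se.2 then d.insert (PySem.Int.toStr idx) 1 else d) d) d)
      (fun k => if data.any (fun j => covB (ivs.filterMap normIv) j && (PySem.Int.toStr j == k)) then 1 else v k) := by
  intro ivs
  induction ivs with
  | nil =>
    intro d v h
    simp only [List.foldl_nil, List.filterMap_nil]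
    exact vals_congr h (fun k => by simp [covB])
  | cons iv rest ih =>
    intro d v h
    rw [List.foldl_cons, List.filterMap_cons]
    cases hni : normIv iv with
    | none => exact ih d v h
    | some se =>
      have h1 := vals_mark (fun idx => decide (se.1 ≤ idx) && decide (idx ≤ se.2)) data d v h
      have h2 := ih _ _ h1
      refine vals_congr h2 ?_
      intro k
      have hdist : data.any (fun j => covB (se :: List.filterMap normIv rest) j && (PySem.Int.toStr j == k))
          = (data.any (fun j => (decide (se.1 ≤ j) && decide (j ≤ se.2)) && (PySem.Int.toStr j == k))
             || data.any (fun j => covB (List.filterMap normIv rest) j && (PySem.Int.toStr j == k))) := by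
        rw [← any_or]
        apply PySem.List.any_congr_mem
        intro j _
        simp only [covB, List.any_cons]
        cases decide (se.1 ≤ j) && decide (j ≤ se.2) <;>
          cases (List.filterMap normIv rest).any (fun p => decide (p.1 ≤ j) && decide (j ≤ p.2)) <;>
          cases PySem.Int.toStr j == k <;> rfl
      rw [hdist]
      cases hA : data.any (fun j => (decide (se.1 ≤ j) && decide (j ≤ se.2)) && (PySem.Int.toStr j == k)) <;>
        cases hB : data.any (fun j => covB (List.filterMap normIv rest) j && (PySem.Int.toStr j == k)) <;>
        simp

lemma A_fold_keys (data : List Int) : ∀ (ivs : List (List Int)) (d : PySem.Dict String Int),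
    (∀ i ∈ data, PySem.Int.toStr i ∈ d.keys) →
    (ivs.foldl (fun d iv => match normIv iv with
      | none => d
      | some se => data.foldl (fun d idx =>
          if se.1 ≤ idx && idx ≤ se.2 then d.insert (PySem.Int.toStr idx) 1 else d) d) d).keys = d.keys := by
  intro ivs
  induction ivs with
  | nil => intro d _; simp
  | cons iv rest ih =>
    intro d h
    rw [List.foldl_cons]
    cases hni : normIv iv with
    | none => exact ih d h
    | some se =>
      have hk := keys_mark (fun idx => decide (se.1 ≤ idx) && decide (idx ≤ se.2)) data d h
      rw [ih _ (fun i hi => by rw [hk]; exact h i hi), hk]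

lemma vals_base : ∀ (data : List Int) (d : PySem.Dict String Int), Vals d (fun _ => 0) →
    Vals (data.foldl (fun d idx => d.insert (PySem.Int.toStr idx) 0) d) (fun _ => 0) := by
  intro data
  induction data with
  | nil => intro d h; simpa using h
  | cons idx rest ih =>
    intro d h
    rw [List.foldl_cons]
    exact ih _ (vals_insert h rfl)

lemma vals_B (merged : List (Int × Int)) : ∀ (data : List Int) (d : PySem.Dict String Int) (v : String → Int), Vals d v →
    (∀ i ∈ data, v (PySem.Int.toStr i) = (if coveredB merged i then 1 else 0)) →
    Vals (data.foldl (fun d idx =>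
      d.insert (PySem.Int.toStr idx) (if coveredB merged idx then 1 else 0)) d) v := by
  intro data
  induction data with
  | nil => intro d v h _; simpa using h
  | cons idx rest ih =>
    intro d v h hv
    rw [List.foldl_cons]
    exact ih _ _ (vals_insert h (hv idx (by simp)))
      (fun i hi => hv i (List.mem_cons_of_mem _ hi))

lemma items_eq_keys_map (d : PySem.Dict String Int) (v : String → Int) (h : Vals d v) :
    d.items = d.keys.map (fun k => (k, v k)) := by
  have hk : d.keys = d.items.map Prod.fst := rfl
  rw [hk, List.map_map]
  have hc : ∀ p ∈ d.items, ((fun k => (k, v k)) ∘ Prod.fst) p = p := by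
    intro p hp
    obtain ⟨k0, w0⟩ := p
    simp only [Function.comp_apply, Prod.mk.injEq, true_and]
    exact (h (k0, w0) hp).symm
  rw [List.map_congr_left hc]
  simp

-- ===== assembly =====
theorem main_eq (intervals : List (List Int)) (data_indices : List Int) :
    convert_intervals_to_dict intervals data_indices
      = convert_intervals_to_dict_alt intervals data_indices := by
  unfold convert_intervals_to_dict convert_intervals_to_dict_alt
  dsimp only
  -- names
  set data := data_indices with hdata
  set spans := spansOf intervals with hspans
  set sortedSpans := PySem.List.sorted spans (fun t => t.1) false with hsorted
  set r := mergeRev sortedSpans with hrdef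
  set merged := r.reverse with hmerged
  -- sortedness and wellformedness of the merge input
  have hpair : sortedSpans.Pairwise (fun p q => p.1 ≤ q.1) :=
    PySem.List.sorted_pairwise spans (fun t => t.1)
  have hwfs : ∀ p ∈ sortedSpans, p.1 ≤ p.2 := fun p hp =>
    wf_spans intervals p ((PySem.List.mem_sorted spans (fun t => t.1) false p).mp hp)
  have hmf : ∀ i : Int, OkR (sortedSpans.foldl mstep []) ∧
      covB (sortedSpans.foldl mstep []) i = (covB [] i || covB sortedSpans i) := fun i =>
    merge_fold i sortedSpans [] hpair hwfs ⟨by simp, by simp⟩ (by simp)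
  have hok : OkR r := (hmf 0).1
  have hmpw : merged.Pairwise (fun p q => p.2 < q.1) := List.pairwise_reverse.mpr hok.1
  have hmwf : ∀ p ∈ merged, p.1 ≤ p.2 := fun p hp => hok.2 p (List.mem_reverse.mp hp)
  -- the coverage chain: binary search over merged = any normalized interval covers
  have hchain : ∀ i : Int, coveredB merged i = covB (intervals.filterMap normIv) i := by
    intro i
    rw [coveredB_iff merged i hmpw hmwf]
    have h1 : covB merged i = covB r i := List.any_reverse
    have h2 : covB r i = covB sortedSpans i := by
      rw [hrdef]; show covB (sortedSpans.foldl mstep []) i = _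
      rw [(hmf i).2]; simp [covB]
    have h3 : covB sortedSpans i = covB spans i :=
      (PySem.List.sorted_perm spans (fun t => t.1) false).any_eq
    rw [h1, h2, h3, hspans, spansOf_eq]
  -- the common value function
  set vfin : String → Int := fun k =>
    if data.any (fun j => covB (intervals.filterMap normIv) j && (PySem.Int.toStr j == k))
    then 1 else 0 with hvfin
  -- A side
  set gt0 := data.foldl (fun d idx => d.insert (PySem.Int.toStr idx) 0) (PySem.Dict.empty : PySem.Dict String Int) with hgt0
  have hbase : Vals gt0 (fun _ => 0) :=
    vals_base data (PySem.Dict.empty : PySem.Dict String Int)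
      (fun p hp => absurd hp (by simp [PySem.Dict.empty]))
  have hstep : (fun (d : PySem.Dict String Int) (interval : List Int) =>
      match interval with
      | [] => d
      | a :: rest =>
        let e := match rest with | b :: _ => b | [] => a
        let se := if a > e then (e, a) else (a, e)
        data.foldl (fun d idx =>
          if se.1 ≤ idx && idx ≤ se.2 then d.insert (PySem.Int.toStr idx) 1 else d) d)
      = (fun (d : PySem.Dict String Int) iv => match normIv iv with
      | none => d
      | some se => data.foldl (fun d idx =>
          if se.1 ≤ idx && idx ≤ se.2 then d.insert (PySem.Int.toStr idx) 1 else d) d) :=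
    funext fun d => funext fun iv => ostep_eq data d iv
  rw [hstep]
  have hAv : Vals (intervals.foldl (fun d iv => match normIv iv with
      | none => d
      | some se => data.foldl (fun d idx =>
          if se.1 ≤ idx && idx ≤ se.2 then d.insert (PySem.Int.toStr idx) 1 else d) d) gt0) vfin := by
    refine vals_congr (A_fold_vals data intervals gt0 (fun _ => 0) hbase) ?_
    intro k; rw [hvfin]
  have hgt0keys : gt0.keys = PySem.Set.update (PySem.Dict.empty : PySem.Dict String Int).keys (data.map PySem.Int.toStr) := by
    rw [hgt0]
    exact PySem.Dict.keys_foldl_insert_key data PySem.Int.toStr (fun _ _ => 0)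
      (PySem.Dict.empty : PySem.Dict String Int)
  have hmem : ∀ i ∈ data, PySem.Int.toStr i ∈ gt0.keys := by
    intro i hi
    rw [hgt0keys]
    exact (PySem.Set.mem_update _ _ _).mpr (Or.inr (List.mem_map_of_mem hi))
  have hAkeys := A_fold_keys data intervals gt0 hmem
  -- B side
  have hBv : Vals (data.foldl (fun d idx =>
      d.insert (PySem.Int.toStr idx) (if coveredB merged idx then 1 else 0)) PySem.Dict.empty) vfin := by
    refine vals_B merged data (PySem.Dict.empty : PySem.Dict String Int) vfin
      (fun p hp => absurd hp (by simp [PySem.Dict.empty])) ?_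
    intro i hi
    rw [hvfin]
    have hany : data.any (fun j => covB (intervals.filterMap normIv) j
        && (PySem.Int.toStr j == PySem.Int.toStr i)) = covB (intervals.filterMap normIv) i := by
      rw [Bool.eq_iff_iff]
      simp only [List.any_eq_true, Bool.and_eq_true, beq_iff_eq]
      constructor
      · rintro ⟨j, _, hcov, heq⟩
        rw [← toStr_inj heq]
        exact hcov
      · intro hcov
        exact ⟨i, hi, hcov, rfl⟩
    dsimp only
    rw [hany, hchain i]
  have hBkeys : (data.foldl (fun d idx =>
      d.insert (PySem.Int.toStr idx) (if coveredB merged idx then 1 else 0))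
      (PySem.Dict.empty : PySem.Dict String Int)).keys
      = PySem.Set.update (PySem.Dict.empty : PySem.Dict String Int).keys (data.map PySem.Int.toStr) :=
    PySem.Dict.keys_foldl_insert_key data PySem.Int.toStr
      (fun _ idx => if coveredB merged idx then 1 else 0) PySem.Dict.empty
  -- conclude
  rw [items_eq_keys_map _ vfin hAv, items_eq_keys_map _ vfin hBv, hAkeys, hgt0keys, hBkeys]

-- ===== VERDICT (by name: the statement is the Claim_ definition above) =====
theorem convert_intervals_to_dict_spec : Claim_equal_convert_intervals_to_dict := by
  intro intervals data_indices _
  unfold Spec_convert_intervals_to_dict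
  exact main_eq intervals data_indices
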